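-- pv_equiv track=rewrite | github.com/CERVANCH21/SEPTIMO-SEMESTRE | automatas II/programas italia/categoria.py | categoria
-- ===== SOURCE A (Python) =====
-- def categoria(linea):
--     tipos = ["entier", "reel", "chaine"]
--     operadores = ["+", "/", "*", "-"]
--
--     tiene_tipo = False
--     tiene_igual = "=" in linea
--     tiene_operador = False
--
--     for tipo in tipos:
--         if tipo in linea:
--             tiene_tipo = True
--             break  # No es necesario seguir buscando si ya se encontró
--
--     for operador in operadores:
--         if operador in linea:
--             tiene_operador = True
--             break  # No es necesario seguir buscando si ya se encontró
--
--     if tiene_tipo: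
--         if tiene_igual and tiene_operador:
--             return "declaracion-operacion"
--         elif tiene_igual:
--             return "declaracion-asignacion"
--         return "declaracion"
--     elif tiene_operador:
--         return "operacion"
--     elif tiene_igual:
--         return "asignacion"
--
--     return "desconocido"  # Caso no contemplado
-- ===== SOURCE B (Python) =====
-- def categoria(linea):
--     # Single character-level pass: walk the line once, flagging '=', operator
--     # characters, and type keywords (via startswith at the current index);
--     # then compose the category name from its parts.
--     tipo = igual = oper = False
--     for i in range(len(linea)):
--         c = linea[i]
--         if c == "=":
--             igual = True
--         elif c in "+/*-":
--             oper = True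
--         elif not tipo and any(linea.startswith(kw, i) for kw in ("entier", "reel", "chaine")):
--             tipo = True
--     if tipo:
--         return "declaracion" + ("-operacion" if igual and oper else "-asignacion" if igual else "")
--     return "operacion" if oper else "asignacion" if igual else "desconocido"
-- ===== Notes on version B (the rewrite author's own statement) =====
-- stated objective: alternative
-- what changed: Replaces A's three separate substring-membership scans and nested if/elif return chain with one character-level left-to-right pass that accumulates the three flags (keywords detected by startswith at the current index), and composes the result string from parts by concatenation.
import Mathlib
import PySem

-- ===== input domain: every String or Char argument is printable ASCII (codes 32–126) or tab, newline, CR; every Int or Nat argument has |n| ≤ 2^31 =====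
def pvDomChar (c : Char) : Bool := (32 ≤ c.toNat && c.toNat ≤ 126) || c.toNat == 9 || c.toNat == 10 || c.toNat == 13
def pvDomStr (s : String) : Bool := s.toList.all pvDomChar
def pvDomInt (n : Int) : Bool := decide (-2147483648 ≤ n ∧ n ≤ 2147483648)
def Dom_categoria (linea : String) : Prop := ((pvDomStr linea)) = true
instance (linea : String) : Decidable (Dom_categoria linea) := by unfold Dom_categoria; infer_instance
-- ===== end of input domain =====

-- B replaces A's staged substring scans and if/elif return chain by one character-level pass accumulating the three flags, composing the result from parts (objective: alternative).

-- ===== PORT A =====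
-- the for-with-break loop setting a flag on the first substring hit
def pvScanBreak (cands : List String) (linea : String) : Bool :=
  match cands with
  | [] => false
  | c :: rest => if PySem.Str.isIn c linea then true else pvScanBreak rest linea

def categoria (linea : String) : String :=
  let tipos := ["entier", "reel", "chaine"]
  let operadores := ["+", "/", "*", "-"]
  let tiene_igual := PySem.Str.isIn "=" linea
  let tiene_tipo := pvScanBreak tipos linea
  let tiene_operador := pvScanBreak operadores linea
  if tiene_tipo then
    if tiene_igual && tiene_operador then "declaracion-operacion"
    else if tiene_igual then "declaracion-asignacion"
    else "declaracion"
  else if tiene_operador then "operacion"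
  else if tiene_igual then "asignacion"
  else "desconocido"

-- ===== PORT B =====
-- the single 'for i in range(len(linea))' pass, as structural recursion on the suffix at
-- index i ('linea.startswith(kw, i)' = startswith on that suffix — exact for 0 ≤ i ≤ len;
-- 'c in "+/*-"' for a single char c is char membership — exact)
def pvPaso (l : List Char) (st : Bool × Bool × Bool) : Bool × Bool × Bool :=
  match l, st with
  | [], st => st
  | c :: rest, (tipo, igual, oper) =>
    if c = '=' then pvPaso rest (tipo, true, oper)
    else if c ∈ "+/*-".toList then pvPaso rest (tipo, igual, true)
    else if !tipo && (["entier", "reel", "chaine"].any fun kw =>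
        PySem.Chars.startswith (c :: rest) kw.toList) then pvPaso rest (true, igual, oper)
    else pvPaso rest (tipo, igual, oper)

-- Python's str '+' ported as String.ofList of the concatenated char lists (exact)
def categoria_alt (linea : String) : String :=
  let st := pvPaso linea.toList (false, false, false)
  let tipo := st.1
  let igual := st.2.1
  let oper := st.2.2
  if tipo then
    String.ofList ("declaracion".toList ++
      (if igual && oper then "-operacion".toList
       else if igual then "-asignacion".toList else []))
  else if oper then "operacion"
  else if igual then "asignacion"
  else "desconocido"

-- ===== PRECONDITION & SPEC =====
def Spec_categoria (linea : String) (out : String) : Prop := out = categoria_alt linea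
instance (linea : String) (out : String) : Decidable (Spec_categoria linea out) := by unfold Spec_categoria; infer_instance

-- ===== CLAIM (what is proved, stated in full; the proofs are below) =====
def Claim_equal_categoria : Prop := ∀ (linea : String), Dom_categoria linea → Spec_categoria linea (categoria linea)

-- ===== LEMMAS AND PROOFS =====

theorem pvScanBreak_eq_any (cands : List String) (linea : String) :
    pvScanBreak cands linea = cands.any (fun c => PySem.Str.isIn c linea) := by
  induction cands with
  | nil => rfl
  | cons c rest ih =>
    simp only [pvScanBreak, List.any_cons, ← ih]
    cases h : PySem.Str.isIn c linea <;> simp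

theorem pv_startswith_false_of_head_ne (c a : Char) (rest as : List Char) (h : a ≠ c) :
    PySem.Chars.startswith (c :: rest) (a :: as) = false := by
  rw [Bool.eq_false_iff]
  intro hh
  rcases List.cons_prefix_cons.mp ((PySem.Chars.startswith_iff _ _).mp hh) with ⟨he, -⟩
  exact h he

theorem pv_exists_drop_cons (sub : List Char) (c : Char) (l : List Char) :
    (∃ j, sub <+: (c :: l).drop j) ↔ (sub <+: c :: l ∨ ∃ j, sub <+: l.drop j) := by
  constructor
  · rintro ⟨j, hj⟩
    cases j with
    | zero => exact Or.inl (by simpa using hj)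
    | succ j => exact Or.inr ⟨j, by simpa using hj⟩
  · rintro (h | ⟨j, hj⟩)
    · exact ⟨0, by simpa using h⟩
    · exact ⟨j + 1, by simpa using hj⟩

theorem pv_isIn_cons (sub : List Char) (c : Char) (l : List Char) :
    PySem.Chars.isIn sub (c :: l) =
      (PySem.Chars.startswith (c :: l) sub || PySem.Chars.isIn sub l) := by
  rw [Bool.eq_iff_iff, Bool.or_eq_true, ← PySem.Chars.exists_prefix_drop_iff_isIn,
    ← PySem.Chars.exists_prefix_drop_iff_isIn, PySem.Chars.startswith_iff,
    pv_exists_drop_cons]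

theorem pv_isIn_singleton (a : Char) (l : List Char) :
    PySem.Chars.isIn [a] l = l.any (· == a) := by
  rw [Bool.eq_iff_iff, PySem.Chars.isIn_iff_infix, List.singleton_infix_iff, List.any_eq_true]
  constructor
  · exact fun h => ⟨a, h, by simp⟩
  · rintro ⟨x, hx, he⟩
    exact (beq_iff_eq.mp he) ▸ hx

theorem pv_kwAny_cons (c : Char) (rest : List Char)
    (he : c ≠ 'e') (hr : c ≠ 'r') (hc : c ≠ 'c') :
    (["entier", "reel", "chaine"].any fun kw => PySem.Chars.isIn kw.toList (c :: rest)) =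
    (["entier", "reel", "chaine"].any fun kw => PySem.Chars.isIn kw.toList rest) := by
  have h1 : "entier".toList = 'e' :: "ntier".toList := rfl
  have h2 : "reel".toList = 'r' :: "eel".toList := rfl
  have h3 : "chaine".toList = 'c' :: "haine".toList := rfl
  simp only [List.any_cons, List.any_nil, pv_isIn_cons, h1, h2, h3,
    pv_startswith_false_of_head_ne c _ rest _ (Ne.symm he),
    pv_startswith_false_of_head_ne c _ rest _ (Ne.symm hr),
    pv_startswith_false_of_head_ne c _ rest _ (Ne.symm hc),
    Bool.false_or]

theorem pvPaso_spec (l : List Char) (t g o : Bool) :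
    pvPaso l (t, g, o) =
      (t || (["entier", "reel", "chaine"].any fun kw => PySem.Chars.isIn kw.toList l),
       g || l.any (· == '='),
       o || l.any (fun c => decide (c ∈ "+/*-".toList))) := by
  induction l generalizing t g o with
  | nil =>
    have hk : (["entier", "reel", "chaine"].any fun kw =>
        PySem.Chars.isIn kw.toList ([] : List Char)) = false := by decide
    simp [pvPaso, hk]
  | cons c rest ih =>
    simp only [pvPaso]
    split_ifs with h1 h2 h3
    · subst h1
      rw [ih, pv_kwAny_cons _ _ (by decide) (by decide) (by decide)]
      simp
    · have h2' : c = '+' ∨ c = '/' ∨ c = '*' ∨ c = '-' := by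
        simpa [List.mem_cons] using h2
      rw [ih]
      rcases h2' with rfl | rfl | rfl | rfl <;>
        rw [pv_kwAny_cons _ _ (by decide) (by decide) (by decide)] <;> simp
    · simp only [Bool.and_eq_true, Bool.not_eq_eq_eq_not, Bool.not_true] at h3
      obtain ⟨ht, hany⟩ := h3
      subst ht
      rw [ih]
      have hT : (["entier", "reel", "chaine"].any fun kw =>
          PySem.Chars.isIn kw.toList (c :: rest)) = true := by
        rcases List.any_eq_true.mp hany with ⟨kw, hmem, hsw⟩
        exact List.any_eq_true.mpr ⟨kw, hmem, by rw [pv_isIn_cons, hsw, Bool.true_or]⟩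
      have hb : (c == '=') = false := by simpa using h1
      have p1 : c ≠ '+' := by intro h; exact h2 (by rw [h]; decide)
      have p2 : c ≠ '/' := by intro h; exact h2 (by rw [h]; decide)
      have p3 : c ≠ '*' := by intro h; exact h2 (by rw [h]; decide)
      have p4 : c ≠ '-' := by intro h; exact h2 (by rw [h]; decide)
      simp [hT, List.any_cons, hb, p1, p2, p3, p4]
    · by_cases ht : t = true
      · subst ht
        rw [ih]
        have hb : (c == '=') = false := by simpa using h1
        have p1 : c ≠ '+' := by intro h; exact h2 (by rw [h]; decide)
        have p2 : c ≠ '/' := by intro h; exact h2 (by rw [h]; decide)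
        have p3 : c ≠ '*' := by intro h; exact h2 (by rw [h]; decide)
        have p4 : c ≠ '-' := by intro h; exact h2 (by rw [h]; decide)
        simp [List.any_cons, hb, p1, p2, p3, p4]
      · have ht' : t = false := by simpa using ht
        subst ht'
        have hany : (["entier", "reel", "chaine"].any fun kw =>
            PySem.Chars.startswith (c :: rest) kw.toList) = false := by
          simpa using h3
        have el1 : "entier".toList = ['e', 'n', 't', 'i', 'e', 'r'] := rfl
        have el2 : "reel".toList = ['r', 'e', 'e', 'l'] := rfl
        have el3 : "chaine".toList = ['c', 'h', 'a', 'i', 'n', 'e'] := rfl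
        simp only [List.any_cons, List.any_nil, Bool.or_eq_false_iff, el1, el2, el3] at hany
        have hb : (c == '=') = false := by simpa using h1
        have p1 : c ≠ '+' := by intro h; exact h2 (by rw [h]; decide)
        have p2 : c ≠ '/' := by intro h; exact h2 (by rw [h]; decide)
        have p3 : c ≠ '*' := by intro h; exact h2 (by rw [h]; decide)
        have p4 : c ≠ '-' := by intro h; exact h2 (by rw [h]; decide)
        rw [ih]
        simp [List.any_cons, List.any_nil, pv_isIn_cons, el1, el2, el3,
          hany.1, hany.2.1, hany.2.2.1, hb, p1, p2, p3, p4]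

theorem pv_any_ops (l : List Char) :
    l.any (fun c => decide (c ∈ "+/*-".toList)) =
      (l.any (· == '+') || (l.any (· == '/') || (l.any (· == '*') || l.any (· == '-')))) := by
  have hop : "+/*-".toList = ['+', '/', '*', '-'] := rfl
  rw [Bool.eq_iff_iff]
  simp only [hop, Bool.or_eq_true, List.any_eq_true, List.mem_cons, beq_iff_eq,
    List.not_mem_nil, or_false, decide_eq_true_eq]
  constructor
  · rintro ⟨x, hx, h⟩
    rcases h with h | h | h | h
    · exact Or.inl ⟨x, hx, h⟩
    · exact Or.inr (Or.inl ⟨x, hx, h⟩)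
    · exact Or.inr (Or.inr (Or.inl ⟨x, hx, h⟩))
    · exact Or.inr (Or.inr (Or.inr ⟨x, hx, h⟩))
  · rintro (⟨x, hx, h⟩ | ⟨x, hx, h⟩ | ⟨x, hx, h⟩ | ⟨x, hx, h⟩)
    · exact ⟨x, hx, Or.inl h⟩
    · exact ⟨x, hx, Or.inr (Or.inl h)⟩
    · exact ⟨x, hx, Or.inr (Or.inr (Or.inl h))⟩
    · exact ⟨x, hx, Or.inr (Or.inr (Or.inr h))⟩

-- ===== VERDICT (by name: the statement is the Claim_ definition above) =====
theorem categoria_spec : Claim_equal_categoria := by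
  intro linea _
  unfold Spec_categoria categoria categoria_alt
  rw [pvPaso_spec]
  simp only [pvScanBreak_eq_any, List.any_cons, List.any_nil, Bool.or_false,
    PySem.Str.isIn_eq, pv_any_ops, Bool.false_or]
  have e1 : "=".toList = ['='] := rfl
  have e2 : "+".toList = ['+'] := rfl
  have e3 : "/".toList = ['/'] := rfl
  have e4 : "*".toList = ['*'] := rfl
  have e5 : "-".toList = ['-'] := rfl
  simp only [e1, e2, e3, e4, e5, pv_isIn_singleton]
  cases hT : (PySem.Chars.isIn "entier".toList linea.toList ||
      (PySem.Chars.isIn "reel".toList linea.toList ||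
        PySem.Chars.isIn "chaine".toList linea.toList)) <;>
  cases hG : linea.toList.any (· == '=') <;>
  cases hO : (linea.toList.any (· == '+') || (linea.toList.any (· == '/') ||
      (linea.toList.any (· == '*') || linea.toList.any (· == '-')))) <;>
    simp
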